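-- pv_equiv track=rewrite | github.com/JugurtaO/BlackJack- | src/app.py | gagnant
-- ===== SOURCE A (Python) =====
-- def gagnant(scores):                        # La fonction reçoit le dictionnaire des scores et cherche le score le plus proche de 21, avant de rajouter tous les joueurs avec ce score dans une liste pour la renvoyer
--     max = 2
--     P_max = ""
--     for key in scores:
--
--         if scores[key] > max and scores[key] <= 21:
--             max = scores[key]
--             p_max = key
--     L =[]
--     for key in scores:
--         if scores[key] == max:
--             L.append(key)
--     return L
-- ===== SOURCE B (Python) =====
-- def gagnant(scores):
--     # Build an index: score value -> list of player keys achieving it (insertion order kept),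
--     # then pick the best value in (2, 21] (falling back to 2) and read its group off the index.
--     groups = {}
--     for key, v in scores.items():
--         groups.setdefault(v, []).append(key)
--     best = max((v for v in groups if 2 < v <= 21), default=2)
--     return groups.get(best, [])
-- ===== Notes on version B (the rewrite author's own statement) =====
-- stated objective: alternative
-- what changed: A scans the dict twice (a running best-score loop then a collection loop); B builds a score->players index in one pass with setdefault/append, takes max of the index's values in (2,21] with default 2, and returns that group from the index.
import Mathlib
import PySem

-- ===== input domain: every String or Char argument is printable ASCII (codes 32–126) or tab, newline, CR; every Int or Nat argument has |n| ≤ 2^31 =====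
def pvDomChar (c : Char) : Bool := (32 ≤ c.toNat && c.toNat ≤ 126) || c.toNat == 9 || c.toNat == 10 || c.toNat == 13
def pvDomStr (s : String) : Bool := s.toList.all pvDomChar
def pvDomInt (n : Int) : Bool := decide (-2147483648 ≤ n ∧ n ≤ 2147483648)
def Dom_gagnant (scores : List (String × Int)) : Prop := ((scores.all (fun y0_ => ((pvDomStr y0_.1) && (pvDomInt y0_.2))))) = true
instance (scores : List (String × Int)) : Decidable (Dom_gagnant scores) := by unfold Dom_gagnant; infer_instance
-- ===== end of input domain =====

-- B replaces A's two scans by build-a-score-index-then-select (same cost, different decomposition).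


-- ===== PORT A =====
-- scores[key] on a key taken from the dict itself always succeeds, so getD's default is never used.
def gagnant (scores : List (String × Int)) : List String :=
  let d := PySem.Dict.mk scores
  let m := List.foldl (fun m key =>
      if d.getD key 0 > m ∧ d.getD key 0 ≤ 21 then d.getD key 0 else m) 2 d.keys
  List.foldl (fun L key => if d.getD key 0 = m then L ++ [key] else L) [] d.keys

-- ===== PORT B =====
-- groups.setdefault(v, []).append(key) is Dict.modify v [] (· ++ [key]); max(gen, default=2) is maxD.
def gagnant_alt (scores : List (String × Int)) : List String :=
  let d := PySem.Dict.mk scores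
  let groups := List.foldl (fun (g : PySem.Dict Int (List String)) p =>
      g.modify p.2 [] (fun l => l ++ [p.1])) PySem.Dict.empty d.items
  let best := PySem.List.maxD (groups.keys.filter (fun v => decide (2 < v ∧ v ≤ 21))) (fun v => v) 2
  groups.getD best []

-- ===== PRECONDITION & SPEC =====
-- Pre_ excludes association lists with a repeated player key: Python A's argument is a dict, whose
-- keys are unique, so such lists represent no dict input and the assoc-list model is ambiguous there.
def Pre_gagnant (scores : List (String × Int)) : Prop := (scores.map Prod.fst).Nodup
instance (scores : List (String × Int)) : Decidable (Pre_gagnant scores) := by unfold Pre_gagnant; infer_instance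
def pvWitness_gagnant : (List (String × Int)) := [("alice", 19), ("bob", 19), ("carl", 25)]

def Spec_gagnant (scores : List (String × Int)) (out : List String) : Prop := out = gagnant_alt scores
instance (scores : List (String × Int)) (out : List String) : Decidable (Spec_gagnant scores out) := by unfold Spec_gagnant; infer_instance

-- ===== CLAIM (what is proved, stated in full; the proofs are below) =====
def Claim_equal_gagnant : Prop := ∀ (scores : List (String × Int)), Dom_gagnant scores → Pre_gagnant scores → Spec_gagnant scores (gagnant scores)

-- ===== LEMMAS AND PROOFS =====

-- A's running-best step, as a function of the looked-up value.
def pvStep (m v : Int) : Int := if v > m ∧ v ≤ 21 then v else m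

theorem pvStep_mono (vs : List Int) (m : Int) : m ≤ List.foldl pvStep m vs := by
  induction vs generalizing m with
  | nil => simp
  | cons v t ih =>
      refine le_trans ?_ (ih (pvStep m v))
      unfold pvStep; split_ifs with h
      · exact le_of_lt h.1
      · exact le_refl m

theorem pvStep_cases (vs : List Int) (m : Int) :
    List.foldl pvStep m vs = m ∨
      (List.foldl pvStep m vs ∈ vs ∧ m < List.foldl pvStep m vs ∧ List.foldl pvStep m vs ≤ 21) := by
  induction vs generalizing m with
  | nil => left; simp
  | cons v t ih =>
      simp only [List.foldl_cons]
      rcases ih (pvStep m v) with h | ⟨hmem, hlt, hle⟩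
      · rw [h]; unfold pvStep; split_ifs with hc
        · exact Or.inr ⟨List.mem_cons_self, hc.1, hc.2⟩
        · exact Or.inl rfl
      · refine Or.inr ⟨List.mem_cons_of_mem _ hmem, lt_of_le_of_lt ?_ hlt, hle⟩
        unfold pvStep; split_ifs with hc
        · exact le_of_lt hc.1
        · exact le_refl m

theorem pvStep_ub (vs : List Int) (m v : Int) (hv : v ∈ vs) (h1 : m < v) (h2 : v ≤ 21) :
    v ≤ List.foldl pvStep m vs := by
  induction vs generalizing m with
  | nil => simp at hv
  | cons a t ih =>
      simp only [List.foldl_cons]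
      rcases List.mem_cons.mp hv with rfl | hvt
      · have hs : pvStep m v = v := by unfold pvStep; rw [if_pos ⟨h1, h2⟩]
        rw [hs]; exact pvStep_mono t v
      · by_cases hlt : pvStep m a < v
        · exact ih (pvStep m a) hvt hlt
        · exact le_trans (le_of_not_gt hlt) (pvStep_mono t (pvStep m a))

theorem pvMaxD_eq_foldl_step (vs : List Int) :
    PySem.List.maxD ((PySem.List.dedup vs).filter (fun v => decide (2 < v ∧ v ≤ 21))) (fun v => v) 2
      = List.foldl pvStep 2 vs := by
  set cs := (PySem.List.dedup vs).filter (fun v => decide (2 < v ∧ v ≤ 21)) with hcs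
  unfold PySem.List.maxD
  cases h : PySem.List.max? cs (fun v => v) with
  | none =>
      have hnil : cs = [] := (PySem.List.max?_eq_none_iff cs _).mp h
      simp only [Option.getD_none]
      rcases pvStep_cases vs 2 with h2 | ⟨hmem, hlt, hle⟩
      · exact h2.symm
      · exfalso
        have : List.foldl pvStep 2 vs ∈ cs := by
          rw [hcs]
          refine List.mem_filter.mpr ⟨(PySem.List.mem_dedup vs _).mpr hmem, ?_⟩
          exact decide_eq_true ⟨hlt, hle⟩
        rw [hnil] at this; simp at this
  | some b =>
      simp only [Option.getD_some]
      have hbcs : b ∈ cs := PySem.List.max?_mem h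
      have hb : b ∈ vs ∧ (2 < b ∧ b ≤ 21) := by
        rcases List.mem_filter.mp (hcs ▸ hbcs) with ⟨hd, hp⟩
        exact ⟨(PySem.List.mem_dedup vs b).mp hd, of_decide_eq_true hp⟩
      have hble : b ≤ List.foldl pvStep 2 vs := pvStep_ub vs 2 b hb.1 hb.2.1 hb.2.2
      rcases pvStep_cases vs 2 with h2 | ⟨hmem, hlt, hle⟩
      · omega
      · have : List.foldl pvStep 2 vs ∈ cs := by
          rw [hcs]
          exact List.mem_filter.mpr ⟨(PySem.List.mem_dedup vs _).mpr hmem, decide_eq_true ⟨hlt, hle⟩⟩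
        have := PySem.List.max?_isMax h _ this
        omega

-- Under Nodup keys, looking a pair's key back up returns the pair's value.
theorem pvLookup (scores : List (String × Int)) (hnd : (scores.map Prod.fst).Nodup)
    (p : String × Int) (hp : p ∈ scores) : (PySem.Dict.mk scores).getD p.1 0 = p.2 :=
  PySem.Dict.getD_of_mem_items (PySem.Dict.mk scores) (by exact hp) hnd 0

theorem gagnant_eq_filter (scores : List (String × Int)) (hnd : (scores.map Prod.fst).Nodup) :
    gagnant scores =
      (scores.filter (fun p => p.2 == List.foldl pvStep 2 (scores.map Prod.snd))).map Prod.fst := by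
  have hm : List.foldl (fun m key =>
      if (PySem.Dict.mk scores).getD key 0 > m ∧ (PySem.Dict.mk scores).getD key 0 ≤ 21
        then (PySem.Dict.mk scores).getD key 0 else m) 2 (PySem.Dict.mk scores).keys
      = List.foldl pvStep 2 (scores.map Prod.snd) := by
    show List.foldl _ 2 (scores.map Prod.fst) = _
    rw [List.foldl_map, List.foldl_map]
    apply PySem.List.foldl_congr_mem
    intro acc p hp
    simp only [pvStep]
    rw [pvLookup scores hnd p hp]
  simp only [gagnant]
  rw [hm]
  rw [PySem.List.foldl_append_ite_eq_filter
    (fun key => (PySem.Dict.mk scores).getD key 0 = List.foldl pvStep 2 (scores.map Prod.snd))]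
  rw [List.nil_append]
  show List.filter _ (scores.map Prod.fst) = _
  rw [List.filter_map]
  congr 1
  apply List.filter_congr
  intro p hp
  simp only [Function.comp_apply]
  rw [pvLookup scores hnd p hp]
  rw [Bool.eq_iff_iff]
  simp

theorem gagnant_alt_eq_filter (scores : List (String × Int)) :
    gagnant_alt scores =
      (scores.filter (fun p => p.2 == List.foldl pvStep 2 (scores.map Prod.snd))).map Prod.fst := by
  have hfold : (List.map (fun p : String × Int => (p.2, p.1)) scores).foldl
        (fun (g : PySem.Dict Int (List String)) q => g.modify q.1 [] (fun l => l ++ [q.2]))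
        PySem.Dict.empty
      = List.foldl (fun (g : PySem.Dict Int (List String)) p =>
        g.modify p.2 [] (fun l => l ++ [p.1])) PySem.Dict.empty scores := by
    rw [List.foldl_map]
  have hgroups : ∀ c : Int,
      (List.foldl (fun (g : PySem.Dict Int (List String)) p =>
        g.modify p.2 [] (fun l => l ++ [p.1])) PySem.Dict.empty scores).getD c []
      = (scores.filter (fun p => p.2 == c)).map Prod.fst := by
    intro c
    rw [← hfold, PySem.Dict.getD_foldl_modify_append]
    rw [PySem.Dict.getD_empty, List.nil_append, List.filter_map, List.map_map]
    rfl
  have hkeys : (List.foldl (fun (g : PySem.Dict Int (List String)) p =>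
        g.modify p.2 [] (fun l => l ++ [p.1])) PySem.Dict.empty scores).keys
      = PySem.List.dedup (scores.map Prod.snd) := by
    rw [PySem.Dict.keys_foldl_modify_key scores (fun p => p.2) []
        (fun g p => fun l => l ++ [p.1]) PySem.Dict.empty]
    rw [PySem.Set.update_eq_append_filter]
    rw [PySem.List.dedup_eq_ofList]
    simp [PySem.Dict.empty]
  simp only [gagnant_alt]
  rw [hkeys, pvMaxD_eq_foldl_step, hgroups]

-- ===== VERDICT (by name: the statement is the Claim_ definition above) =====
theorem gagnant_spec : Claim_equal_gagnant := by
  intro scores _ hpre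
  unfold Spec_gagnant
  rw [gagnant_eq_filter scores hpre, gagnant_alt_eq_filter scores]
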